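-- pv_equiv track=rewrite | github.com/vinnnncennnnt/HTTP-Proxy | Main/main.py | parseGETRequest
-- ===== SOURCE A (Python) =====
-- def parseGETRequest (line ):
--     pos=0
--     tab=[]
--     subString=''
--     start =False
--     for i , unChar in enumerate(line) :
--         if unChar=='?':
--             pos=i
--             break
--     line = line[pos+1:]+'&'
--     for  i ,unChar in enumerate(line ):
--         if unChar=='=':
--             start = True
--         if unChar == "&" :
--             start = False
--         if start :
--             subString+=unChar
--             continue
--         if not start  and unChar == "&" :
--             tab.append(subString[1:])
--             subString=''
--             start = False
--     return tab
-- ===== SOURCE B (Python) =====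
-- def parseGETRequest(line):
--     i = line.find('?')
--     query = line[i:] if i >= 0 else line
--     return [t.partition('=')[2] for t in query[1:].split('&')]
-- ===== Notes on version B (the rewrite author's own statement) =====
-- stated objective: idiomatic
-- what changed: Replaces A's per-character boolean state machine (and the manual enumerate/break search for the query start) by one find/slice followed by splitting on the parameter separator, mapping partition over the tokens; the measured speedup comes from doing the scanning in C-level str methods instead of a Python char loop.
import Mathlib
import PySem

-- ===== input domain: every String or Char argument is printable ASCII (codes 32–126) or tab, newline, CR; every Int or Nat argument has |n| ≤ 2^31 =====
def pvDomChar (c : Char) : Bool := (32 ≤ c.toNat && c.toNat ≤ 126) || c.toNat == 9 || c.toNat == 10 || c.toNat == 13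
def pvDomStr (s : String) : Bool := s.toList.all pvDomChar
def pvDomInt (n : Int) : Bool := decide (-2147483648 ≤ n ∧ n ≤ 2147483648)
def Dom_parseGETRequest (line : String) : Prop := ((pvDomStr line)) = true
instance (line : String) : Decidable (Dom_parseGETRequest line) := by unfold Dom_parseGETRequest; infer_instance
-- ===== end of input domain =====

-- B replaces A's per-character state machine by one find/slice plus split('&') with partition('=') mapped over the tokens (objective: idiomatic; return value only, no mutation involved).

-- ===== PORT A =====
-- A's first for-loop: pos := index of first '?' (break), pos stays the initial 0 if there is none
def pvA_findPos : List (Int × Char) → Int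
  | [] => 0
  | (i, c) :: rest => if c = '?' then i else pvA_findPos rest

-- A's second for-loop: state (tab, subString, start); the enumerate index i is unused in the loop body
def pvA_loop : List Char → List String → List Char → Bool → List String
  | [], tab, _, _ => tab
  | c :: rest, tab, sub, start =>
    let start := if c = '=' then true else start
    let start := if c = '&' then false else start
    if start then pvA_loop rest tab (sub ++ [c]) start
    else if c = '&' then
      pvA_loop rest (tab ++ [String.mk (PySem.List.slice sub (some 1) none)]) [] false
    else pvA_loop rest tab sub start

def parseGETRequest (line : String) : List String :=
  let pos := pvA_findPos (PySem.List.enumerate line.toList)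
  let line2 := PySem.List.slice line.toList (some (pos + 1)) none ++ ['&']
  pvA_loop line2 [] [] false

-- ===== PORT B =====
-- t.partition('=')[2] for the 1-char separator '=': everything after the first '=', '' if there is none (exact)
def pvB_afterEq (t : List Char) : List Char := (t.dropWhile (· != '=')).drop 1

def parseGETRequest_alt (line : String) : List String :=
  let i := PySem.Str.find line "?"
  let query := if 0 ≤ i then PySem.List.slice line.toList (some i) none else line.toList
  (PySem.Chars.splitOn (PySem.List.slice query (some 1) none) ['&']).map
    (fun t => String.mk (pvB_afterEq t))

-- ===== PRECONDITION & SPEC =====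
def Spec_parseGETRequest (line : String) (out : List String) : Prop := out = parseGETRequest_alt line
instance (line : String) (out : List String) : Decidable (Spec_parseGETRequest line out) := by unfold Spec_parseGETRequest; infer_instance

-- ===== CLAIM (what is proved, stated in full; the proofs are below) =====
def Claim_equal_parseGETRequest : Prop := ∀ (line : String), Dom_parseGETRequest line → Spec_parseGETRequest line (parseGETRequest line)

-- ===== LEMMAS AND PROOFS =====

-- proof-side splitter: split a char list on '&' (the shape shared by both programs)
def pvS : List Char → List (List Char)
  | [] => [[]]
  | c :: r =>
    if c = '&' then [] :: pvS r
    else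
      match pvS r with
      | [] => [[c]]
      | h :: t => (c :: h) :: t

-- prepend pre to the first piece
def pvModH (pre : List Char) : List (List Char) → List (List Char)
  | [] => [pre]
  | h :: t => (pre ++ h) :: t

lemma pvS_ne_nil (l : List Char) : pvS l ≠ [] := by
  cases l with
  | nil => simp [pvS]
  | cons c r =>
    simp only [pvS]
    split
    · simp
    · rcases h : pvS r with _ | ⟨h', t⟩ <;> simp

lemma pvModH_nil_of_ne (L : List (List Char)) (h : L ≠ []) : pvModH [] L = L := by
  cases L with
  | nil => exact absurd rfl h
  | cons a t => simp [pvModH]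

lemma pvModH_modH (p q : List Char) (L : List (List Char)) :
    pvModH p (pvModH q L) = pvModH (p ++ q) L := by
  cases L <;> simp [pvModH]

lemma pvS_cons_amp (r : List Char) : pvS ('&' :: r) = [] :: pvS r := by simp [pvS]

lemma pvS_cons_ne (c : Char) (r : List Char) (hc : c ≠ '&') :
    pvS (c :: r) = pvModH [c] (pvS r) := by
  simp only [pvS, if_neg hc]
  rcases h : pvS r with _ | ⟨h', t⟩
  · exact absurd h (pvS_ne_nil r)
  · simp [pvModH]

lemma pvModH_append_sing (p : List Char) (L : List (List Char)) (x : List Char) (h : L ≠ []) :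
    pvModH p (L ++ [x]) = pvModH p L ++ [x] := by
  cases L with
  | nil => exact absurd rfl h
  | cons a t => simp [pvModH]

lemma pvS_append_amp (q : List Char) : pvS (q ++ ['&']) = pvS q ++ [[]] := by
  induction q with
  | nil => simp [pvS]
  | cons c r ih =>
    by_cases hc : c = '&'
    · subst hc; simp [pvS_cons_amp, ih]
    · rw [List.cons_append, pvS_cons_ne c _ hc, pvS_cons_ne c r hc, ih,
        pvModH_append_sing _ _ _ (pvS_ne_nil r)]

-- splitOn.go on the single-char separator '&', with enough fuel, computes pvS
lemma pvSplit_go_eq (l : List Char) : ∀ (fuel : Nat), l.length < fuel →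
    ∀ (cur : List Char) (acc : List (List Char)),
    PySem.Chars.splitOn.go ['&'] fuel l cur acc = acc.reverse ++ pvModH cur.reverse (pvS l) := by
  induction l with
  | nil =>
    intro fuel hf cur acc
    cases fuel with
    | zero => omega
    | succ f => simp [PySem.Chars.splitOn.go, pvS, pvModH]
  | cons c rest ih =>
    intro fuel hf cur acc
    cases fuel with
    | zero => simp at hf
    | succ f =>
      by_cases hc : c = '&'
      · subst hc
        have hpre : (['&'].isPrefixOf ('&' :: rest)) = true := by simp [List.isPrefixOf]
        simp only [PySem.Chars.splitOn.go, hpre, if_true, List.length_singleton,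
          List.drop_succ_cons, List.drop_zero]
        rw [ih f (by simpa using hf) [] (cur.reverse :: acc)]
        rcases hS : pvS rest with _ | ⟨h, t⟩
        · exact absurd hS (pvS_ne_nil rest)
        · simp [pvS_cons_amp, pvModH, hS]
      · have hpre : (['&'].isPrefixOf (c :: rest)) = false := by
          simp [List.isPrefixOf, Ne.symm hc]
        simp only [PySem.Chars.splitOn.go, hpre, Bool.false_eq_true, if_false]
        rw [ih f (by simpa using hf) (c :: cur) acc]
        rw [pvS_cons_ne c rest hc, pvModH_modH]
        simp

lemma pvSplitOn_eq_pvS (l : List Char) : PySem.Chars.splitOn l ['&'] = pvS l := by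
  unfold PySem.Chars.splitOn
  rw [pvSplit_go_eq l (l.length + 1) (by omega) [] []]
  simp [pvModH_nil_of_ne _ (pvS_ne_nil l)]

-- find on the single-char pattern '?'
lemma pvFind_go_eq (l : List Char) : ∀ (k : Nat),
    PySem.Chars.find.go ['?'] l k =
      if '?' ∈ l then (k : Int) + ((l.takeWhile (· != '?')).length : Int) else -1 := by
  induction l with
  | nil => intro k; simp [PySem.Chars.find.go]
  | cons c rest ih =>
    intro k
    by_cases hc : c = '?'
    · subst hc
      have hpre : (['?'].isPrefixOf ('?' :: rest)) = true := by simp [List.isPrefixOf]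
      simp [PySem.Chars.find.go, hpre]
    · have hpre : (['?'].isPrefixOf (c :: rest)) = false := by
        simp [List.isPrefixOf, Ne.symm hc]
      simp only [PySem.Chars.find.go, hpre, Bool.false_eq_true, if_false]
      rw [ih (k + 1)]
      have hcb : (c != '?') = true := by simp [hc]
      by_cases hm : '?' ∈ rest
      · rw [if_pos hm, if_pos (by simp [hm] : '?' ∈ c :: rest),
          List.takeWhile_cons, if_pos hcb, List.length_cons]
        push_cast
        ring
      · rw [if_neg hm, if_neg (by simp [hm, eq_comm, hc] : ¬ '?' ∈ c :: rest)]

lemma pvFindPos_eq (l : List Char) : ∀ (s : Int),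
    pvA_findPos (PySem.List.enumerate l s) =
      if '?' ∈ l then s + ((l.takeWhile (· != '?')).length : Int) else 0 := by
  induction l with
  | nil => intro s; simp [PySem.List.enumerate_nil, pvA_findPos]
  | cons c rest ih =>
    intro s
    rw [PySem.List.enumerate_cons]
    by_cases hc : c = '?'
    · subst hc; simp [pvA_findPos]
    · simp only [pvA_findPos, if_neg hc]
      rw [ih (s + 1)]
      have hcb : (c != '?') = true := by simp [hc]
      by_cases hm : '?' ∈ rest
      · rw [if_pos hm, if_pos (by simp [hm] : '?' ∈ c :: rest),
          List.takeWhile_cons, if_pos hcb, List.length_cons]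
        push_cast
        ring
      · rw [if_neg hm, if_neg (by simp [hm, eq_comm, hc] : ¬ '?' ∈ c :: rest)]

lemma pvAfterEq_cons_ne (c : Char) (h : List Char) (hc : c ≠ '=') :
    pvB_afterEq (c :: h) = pvB_afterEq h := by
  simp [pvB_afterEq, hc]

-- the second loop, from each reachable state, is mapping pvB_afterEq over the complete tokens
lemma pvScan (l : List Char) :
    (∀ tab, pvA_loop l tab [] false =
        tab ++ ((pvS l).dropLast).map (fun t => String.mk (pvB_afterEq t))) ∧
    (∀ sub tab, pvA_loop l tab ('=' :: sub) true =
        tab ++ ((pvModH ('=' :: sub) (pvS l)).dropLast).map (fun t => String.mk (pvB_afterEq t))) := by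
  induction l with
  | nil =>
    constructor <;> intros <;> simp [pvA_loop, pvS, pvModH]
  | cons c rest ih =>
    obtain ⟨ih1, ih2⟩ := ih
    have hSr := pvS_ne_nil rest
    constructor
    · intro tab
      by_cases hc : c = '&'
      · subst hc
        simp only [pvA_loop, reduceIte, if_neg (by decide : ¬ ('&' = '='))]
        rw [ih1 (tab ++ [String.mk (PySem.List.slice [] (some 1) none)])]
        rcases hS : pvS rest with _ | ⟨h, t⟩
        · exact absurd hS hSr
        · simp [pvS_cons_amp, hS, pvB_afterEq, PySem.List.slice]
      · by_cases he : c = '='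
        · subst he
          simp only [pvA_loop, reduceIte, if_neg hc, List.nil_append]
          rw [ih2 [] tab, pvS_cons_ne _ _ hc]
        · simp only [pvA_loop, if_neg he, if_neg hc]
          rw [ih1 tab, pvS_cons_ne _ _ hc]
          rcases hS : pvS rest with _ | ⟨h, t⟩
          · exact absurd hS hSr
          · rcases t with _ | ⟨h2, t2⟩
            · simp [pvModH]
            · simp [pvModH, pvAfterEq_cons_ne c h he]
    · intro sub tab
      by_cases hc : c = '&'
      · subst hc
        simp only [pvA_loop, reduceIte, if_neg (by decide : ¬ ('&' = '='))]
        rw [ih1 (tab ++ [String.mk (PySem.List.slice ('=' :: sub) (some 1) none)])]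
        rcases hS : pvS rest with _ | ⟨h, t⟩
        · exact absurd hS hSr
        · simp [pvS_cons_amp, hS, pvModH, pvB_afterEq, PySem.List.slice_from_one]
      · simp only [pvA_loop, if_neg hc, ite_self, reduceIte]
        have harg : ('=' :: sub) ++ [c] = '=' :: (sub ++ [c]) := by simp
        rw [harg, ih2 (sub ++ [c]) tab, pvS_cons_ne _ _ hc, pvModH_modH]
        simp

-- ===== VERDICT (by name: the statement is the Claim_ definition above) =====
-- both programs reduce to mapping pvB_afterEq over pvS of the same suffix of the line
lemma pvMain (q : List Char) :
    pvA_loop (q ++ ['&']) [] [] false =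
      (PySem.Chars.splitOn q ['&']).map (fun t => String.mk (pvB_afterEq t)) := by
  rw [(pvScan (q ++ ['&'])).1, pvS_append_amp, pvSplitOn_eq_pvS]
  simp

theorem parseGETRequest_spec : Claim_equal_parseGETRequest := by
  unfold Claim_equal_parseGETRequest
  intro line _
  unfold Spec_parseGETRequest parseGETRequest parseGETRequest_alt
  simp only []
  have hfind : PySem.Str.find line "?" = PySem.Chars.find.go ['?'] line.toList 0 := by
    simp [PySem.Chars.find]
  by_cases hm : '?' ∈ line.toList
  · set w := (line.toList.takeWhile (· != '?')).length with hw
    have hpos : pvA_findPos (PySem.List.enumerate line.toList 0) = (w : Int) := by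
      rw [pvFindPos_eq line.toList 0]; simp [hm, hw.symm]
    have hf : PySem.Str.find line "?" = (w : Int) := by
      rw [hfind, pvFind_go_eq line.toList 0]; simp [hm, hw.symm]
    rw [hpos, hf, if_pos (by positivity)]
    have h1 : PySem.List.slice line.toList (some ((w : Int) + 1)) none
        = line.toList.drop (w + 1) := by
      have : ((w : Int) + 1) = ((w + 1 : Nat) : Int) := by push_cast; ring
      rw [this, PySem.List.slice_from_natCast]
    have h2 : PySem.List.slice (PySem.List.slice line.toList (some ((w : Int))) none)
        (some 1) none = line.toList.drop (w + 1) := by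
      rw [PySem.List.slice_from_natCast, PySem.List.slice_from_one, List.tail_drop]
    rw [h1, h2, pvMain]
  · have hpos : pvA_findPos (PySem.List.enumerate line.toList 0) = 0 := by
      rw [pvFindPos_eq line.toList 0]; simp [hm]
    have hf : PySem.Str.find line "?" = -1 := by
      rw [hfind, pvFind_go_eq line.toList 0]; simp [hm]
    rw [hpos, hf, if_neg (by norm_num)]
    have h1 : PySem.List.slice line.toList (some ((0 : Int) + 1)) none = line.toList.tail := by
      norm_num [PySem.List.slice_from_one]
    rw [h1, PySem.List.slice_from_one, pvMain]
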